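-- pv_equiv track=rewrite | github.com/tachyonlabs/CodePath-Alumni-Professional-Interview-Prep-Course | interviewbit-arrays-find-permutation.py | findPerm
-- ===== SOURCE A (Python) =====
-- def findPerm(A, B):
--     """
--     Just walk through an array of size B increasing or decreasing numbers as necessary,
--     keeping track of the current largest and smallest numbers, and then make a pass
--     over the array adding (1 - smallest) to each number so they'll all be positive. I
--     would have gotten more points and a faster time except that InterviewBit kept
--     giving me a "Internal Error. We are working on fixing this issue ASAP" when I
--     would click Submit.
--     """
--     smallest = largest = 1
--     results = [1] * B
--     for i, c in enumerate(A):
--         if c == "I":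
--             results[i + 1] = largest + 1
--             largest += 1
--         else:
--             results[i + 1] = smallest - 1
--             smallest -= 1
--
--     return [num + (1 - smallest) for num in results]
-- ===== SOURCE B (Python) =====
-- def findPerm(A, B):
--     # Backward traversal: precompute the totals, then walk A in reverse writing each
--     # slot's final value straight from suffix counts -- no running min/max and no
--     # normalization pass.
--     tI = sum(1 for c in A if c == "I")
--     d = len(A) - tI
--     out = [d + 1] * B
--     sI = sD = 0
--     for i, c in reversed(list(enumerate(A))):
--         if c == "I":
--             out[i + 1] = d + 1 + (tI - sI)
--             sI += 1
--         else:
--             out[i + 1] = 1 + sD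
--             sD += 1
--     return out
-- ===== Notes on version B (the rewrite author's own statement) =====
-- stated objective: alternative
-- what changed: Replaces A's forward min/max-tracking simulation plus final normalization pass with a backward traversal that writes each slot's final value directly from precomputed totals and suffix counts.
import Mathlib
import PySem

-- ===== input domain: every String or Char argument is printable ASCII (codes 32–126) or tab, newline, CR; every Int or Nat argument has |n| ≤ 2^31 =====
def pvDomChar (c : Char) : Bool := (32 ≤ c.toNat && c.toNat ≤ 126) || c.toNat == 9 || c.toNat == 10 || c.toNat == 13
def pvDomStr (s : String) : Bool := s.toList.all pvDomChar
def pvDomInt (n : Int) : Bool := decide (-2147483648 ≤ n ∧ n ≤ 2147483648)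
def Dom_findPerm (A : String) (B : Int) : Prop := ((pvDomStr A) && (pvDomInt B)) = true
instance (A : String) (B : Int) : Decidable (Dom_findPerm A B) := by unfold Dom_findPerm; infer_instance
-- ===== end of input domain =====

-- B replaces A's forward min/max-tracking simulation plus normalization pass by a
-- backward traversal writing final values straight from suffix counts (objective:
-- alternative, same cost).

-- ===== PORT A =====
-- loop body of A: state (smallest, largest, results)
def findPermStep (st : Int × Int × List Int) (p : Int × Char) : Int × Int × List Int :=
  if p.2 = 'I' then (st.1, st.2.1 + 1, PySem.List.pySetD st.2.2 (p.1 + 1) (st.2.1 + 1))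
  else (st.1 - 1, st.2.1, PySem.List.pySetD st.2.2 (p.1 + 1) (st.1 - 1))

def findPerm (A : String) (B : Int) : List Int :=
  let st := (PySem.List.enumerate A.toList).foldl findPermStep (1, 1, List.replicate B.toNat 1)
  st.2.2.map (fun num => num + (1 - st.1))

-- ===== PORT B =====
-- loop body of B: state (sI, sD, out)
def findPermBStep (tI d : Int) (st : Int × Int × List Int) (p : Int × Char) : Int × Int × List Int :=
  if p.2 = 'I' then (st.1 + 1, st.2.1, PySem.List.pySetD st.2.2 (p.1 + 1) (d + 1 + (tI - st.1)))
  else (st.1, st.2.1 + 1, PySem.List.pySetD st.2.2 (p.1 + 1) (1 + st.2.1))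

def findPerm_alt (A : String) (B : Int) : List Int :=
  let L := A.toList
  let tI : Int := L.foldl (fun acc c => if c = 'I' then acc + 1 else acc) 0
  let d : Int := (L.length : Int) - tI
  -- for i, c in reversed(list(enumerate(A)))
  ((PySem.List.enumerate L).reverse.foldl (findPermBStep tI d)
    (0, 0, List.replicate B.toNat (d + 1))).2.2

-- ===== PRECONDITION & SPEC =====
-- Pre_ excludes exactly the inputs on which A raises IndexError: a nonempty A
-- whose length is ≥ B (the loop writes at index len(A) ≥ B).  (B raises there too.)
def Pre_findPerm (A : String) (B : Int) : Prop := A.toList = [] ∨ (A.toList.length : Int) < B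
instance (A : String) (B : Int) : Decidable (Pre_findPerm A B) := by unfold Pre_findPerm; infer_instance
def pvWitness_findPerm : String × Int := ("IDI", 4)
def Spec_findPerm (A : String) (B : Int) (out : List Int) : Prop := out = findPerm_alt A B
instance (A : String) (B : Int) (out : List Int) : Decidable (Spec_findPerm A B out) := by unfold Spec_findPerm; infer_instance

-- ===== CLAIM (what is proved, stated in full; the proofs are below) =====
def Claim_equal_findPerm : Prop := ∀ (A : String) (B : Int), Dom_findPerm A B → Pre_findPerm A B → Spec_findPerm A B (findPerm A B)

-- ===== LEMMAS AND PROOFS =====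

-- the (unshifted) values A's loop writes at positions 1..n, as a list
def valsA : List Char → Int → Int → List Int
  | [], _, _ => []
  | c :: L, s, l =>
    if c = 'I' then (l + 1) :: valsA L s (l + 1) else (s - 1) :: valsA L (s - 1) l

-- the values B's backward loop writes, read front-to-back
def valsB (tI d : Int) : List Char → Int → Int → List Int
  | [], _, _ => []
  | c :: L, sI, sD =>
    (if c = 'I' then d + 1 + (tI - (sI + (L.count 'I' : Int)))
     else 1 + (sD + ((L.filter (fun x => x ≠ 'I')).length : Int))) :: valsB tI d L sI sD

-- setting the last element of a take: in-range update as an append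
lemma set_take_concat (r : List Int) (k : Nat) (v : Int) (hk1 : k + 1 < r.length) :
    (r.take (k + 1 + 1)).set (k + 1) v = r.take (k + 1) ++ [v] := by
  have h2 : r.take (k + 1 + 1) = r.take (k + 1) ++ [r[k + 1]] := by
    rw [List.take_add_one, List.getElem?_eq_getElem hk1]
    rfl
  rw [h2, List.set_append]
  simp [Nat.min_eq_left hk1.le]

-- A's fold writes valsA consecutively at indices k+1 .. k+|L|
lemma foldA_results (L : List Char) (k : Nat) (s l : Int) (r : List Int)
    (hlen : k + 1 + L.length ≤ r.length) :
    ((PySem.List.enumerate L (k : Int)).foldl findPermStep (s, l, r)).2.2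
      = r.take (k + 1) ++ valsA L s l ++ r.drop (k + 1 + L.length) := by
  induction L generalizing k s l r with
  | nil => simp [PySem.List.enumerate_nil, valsA]
  | cons c L ih =>
    rw [PySem.List.enumerate_cons]
    have hk1 : k + 1 < r.length := by simp at hlen; omega
    have hset : ∀ v : Int, PySem.List.pySetD r ((k : Int) + 1) v = r.set (k + 1) v := by
      intro v
      have : ((k : Int) + 1) = ((k + 1 : Nat) : Int) := by push_cast; ring
      rw [this, PySem.List.pySetD_natCast]
    have hcast : ((k : Int) + 1) = (((k + 1 : Nat)) : Int) := by push_cast; ring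
    have htake : ∀ v : Int, (r.set (k + 1) v).take (k + 1 + 1) = r.take (k + 1) ++ [v] := by
      intro v
      rw [List.take_set]
      exact set_take_concat r k v hk1
    by_cases hc : c = 'I'
    · simp only [List.foldl_cons, findPermStep, hc, reduceIte, hset]
      rw [hcast, ih (k+1) s (l+1) _ (by simp; simp at hlen; omega)]
      rw [htake, List.drop_set_of_lt (by omega)]
      simp [valsA]
      omega
    · simp only [List.foldl_cons, findPermStep, hc, reduceIte, hset]
      rw [hcast, ih (k+1) (s-1) l _ (by simp; simp at hlen; omega)]
      rw [htake, List.drop_set_of_lt (by omega)]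
      simp [valsA, hc]
      omega

-- the fold's `smallest` component counts the non-'I' characters
lemma fold_smallest (L : List (Int × Char)) (s l : Int) (r : List Int) :
    (L.foldl findPermStep (s, l, r)).1 =
      s - ((L.filter (fun p => p.2 ≠ 'I')).length : Int) := by
  induction L generalizing s l r with
  | nil => simp
  | cons p L ih =>
    by_cases hc : p.2 = 'I'
    · simp [findPermStep, hc, ih]
    · simp only [List.foldl_cons, findPermStep, if_neg hc, List.filter_cons,
        decide_eq_true_eq]
      rw [ih]
      simp [hc]
      omega

lemma filter_enum (xs : List Char) (s : Int) :
    ((PySem.List.enumerate xs s).filter (fun p => p.2 ≠ 'I')).length =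
      (xs.filter (fun c => c ≠ 'I')).length := by
  rw [← List.countP_eq_length_filter, ← List.countP_eq_length_filter]
  conv_rhs => rw [← PySem.List.map_snd_enumerate xs s, List.countP_map]
  rfl

-- B's backward fold writes valsB consecutively at indices k+1 .. k+|L| and
-- advances the two counters by the totals of L
lemma foldB_results (tI d : Int) (L : List Char) (k : Nat) (sI sD : Int) (r : List Int)
    (hlen : k + 1 + L.length ≤ r.length) :
    (PySem.List.enumerate L (k : Int)).reverse.foldl (findPermBStep tI d) (sI, sD, r)
      = (sI + (L.count 'I' : Int),
         sD + ((L.filter (fun x => x ≠ 'I')).length : Int),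
         r.take (k + 1) ++ valsB tI d L sI sD ++ r.drop (k + 1 + L.length)) := by
  induction L generalizing k r with
  | nil => simp [PySem.List.enumerate_nil, valsB]
  | cons c L ih =>
    rw [PySem.List.enumerate_cons, List.reverse_cons, List.foldl_append]
    have hk1 : k + 1 < r.length := by simp at hlen; omega
    have hcast : ((k : Int) + 1) = (((k + 1 : Nat)) : Int) := by push_cast; ring
    rw [hcast, ih (k+1) _ (by simp at hlen ⊢; omega)]
    have hset : ∀ (q : List Int) (v : Int),
        PySem.List.pySetD q ((k : Int) + 1) v = q.set (k + 1) v := by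
      intro q v
      rw [hcast, PySem.List.pySetD_natCast]
    have htlen : (r.take (k + 1 + 1)).length = k + 1 + 1 := by
      simp
      omega
    have hsplice : ∀ v : Int,
        (r.take (k + 1 + 1) ++ (valsB tI d L sI sD ++ r.drop (k + 1 + 1 + L.length))).set
            (k + 1) v
          = r.take (k + 1) ++ (v :: valsB tI d L sI sD) ++ r.drop (k + 1 + (c :: L).length) := by
      intro v
      rw [List.set_append, if_pos (by rw [htlen]; omega), set_take_concat r k v hk1]
      simp [List.length_cons]
      omega
    by_cases hc : c = 'I'
    · simp only [List.foldl_cons, List.foldl_nil, findPermBStep, hc, reduceIte, hset,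
        List.append_assoc]
      rw [hsplice]
      simp only [valsB, hc, reduceIte, List.count_cons, List.filter_cons]
      simp [List.append_assoc]
      ring
    · simp only [List.foldl_cons, List.foldl_nil, findPermBStep, hc, reduceIte, hset,
        List.append_assoc]
      rw [hsplice]
      simp only [valsB, hc, reduceIte, List.count_cons, List.filter_cons]
      simp [hc, List.append_assoc]
      ring

-- the bridge: shifting valsA by d gives valsB, under the prefix/suffix count invariants
lemma valsA_shift (tI d : Int) (L : List Char) (s l sI sD : Int)
    (hl : l = tI - sI - (L.count 'I' : Int) + 1)
    (hs : s = 1 - d + sD + ((L.filter (fun x => x ≠ 'I')).length : Int)) :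
    (valsA L s l).map (· + d) = valsB tI d L sI sD := by
  induction L generalizing s l with
  | nil => simp [valsA, valsB]
  | cons c L ih =>
    rw [List.count_cons] at hl
    rw [List.filter_cons] at hs
    by_cases hc : c = 'I'
    · rw [if_pos (by simp [hc])] at hl
      rw [if_neg (by simp [hc])] at hs
      simp only [valsA, valsB, hc, reduceIte, List.map_cons]
      congr 1
      · push_cast at hl
        omega
      · exact ih s (l + 1) (by push_cast at hl ⊢; omega) hs
    · rw [if_neg (by simp [hc])] at hl
      rw [if_pos (by simp [hc])] at hs
      simp only [valsA, valsB, hc, reduceIte, List.map_cons]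
      simp only [List.length_cons] at hs
      congr 1
      · push_cast at hs
        omega
      · exact ih (s - 1) l hl (by push_cast at hs ⊢; omega)

lemma count_foldl (L : List Char) :
    L.foldl (fun acc c => if c = 'I' then acc + 1 else acc) (0 : Int) = (L.count 'I' : Int) := by
  rw [PySem.List.foldl_ite_add_one]
  simp [List.count]
  exact List.countP_congr (fun c _ => by simp)

lemma filter_len_eq (L : List Char) :
    ((L.filter (fun x => x ≠ 'I')).length : Int) = (L.length : Int) - (L.count 'I' : Int) := by
  induction L with
  | nil => simp
  | cons c L ih =>
    rw [List.filter_cons, List.count_cons]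
    by_cases hc : c = 'I'
    · rw [if_neg (by simp [hc]), if_pos (by simp [hc])]
      simp only [List.length_cons]
      push_cast at ih ⊢
      omega
    · rw [if_pos (by simp [hc]), if_neg (by simp [hc])]
      simp only [List.length_cons, List.length_cons]
      push_cast at ih ⊢
      omega

theorem findPerm_eq_alt (A : String) (B : Int) (hpre : Pre_findPerm A B) :
    findPerm A B = findPerm_alt A B := by
  unfold findPerm findPerm_alt
  simp only [count_foldl]
  set L := A.toList with hL
  set tI : Int := (L.count 'I' : Int) with htI
  set d : Int := (L.length : Int) - tI with hd
  have hcd : ((L.filter (fun x => x ≠ 'I')).length : Int) = d := by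
    rw [filter_len_eq, hd]
  have hsm : ((PySem.List.enumerate L 0).foldl findPermStep
      (1, 1, List.replicate B.toNat 1)).1 = 1 - d := by
    rw [fold_smallest]
    have := filter_enum L 0
    rw [this, hcd]
  rcases hpre with hnil | hlt
  · -- A = "" : both folds are the identity, d = 0
    have hnil' : L = [] := by rw [hL]; exact hnil
    have htI0 : tI = 0 := by simp [htI, hnil']
    have hd0 : d = 0 := by simp [hd, hnil', htI0]
    simp [hnil', PySem.List.enumerate_nil, hd0, htI0]
  · -- |A| < B : all writes are in range
    simp only [← hL] at hlt
    have hn1 : L.length + 1 ≤ B.toNat := by omega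
    have h1B : 1 ≤ B.toNat := by omega
    have hfoldA := foldA_results L 0 1 1 (List.replicate B.toNat 1) (by simp; omega)
    have hfoldB := foldB_results tI d L 0 0 0 (List.replicate B.toNat (d + 1)) (by simp; omega)
    simp only [Nat.cast_zero] at hfoldA hfoldB
    have hbridge : (valsA L 1 1).map (· + d) = valsB tI d L 0 0 := by
      refine valsA_shift tI d L 1 1 0 0 (by omega) (by rw [hcd]; ring)
    have hshift : (1 : Int) - (1 - d) = d := by ring
    rw [hsm, hfoldA, hfoldB, hshift]
    rw [List.map_append, List.map_append, hbridge]
    simp only [List.take_replicate, List.drop_replicate, List.map_replicate]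
    simp [add_comm]

-- ===== VERDICT (by name: the statement is the Claim_ definition above) =====
theorem findPerm_spec : Claim_equal_findPerm := by
  intro A B _ hpre
  unfold Spec_findPerm
  exact findPerm_eq_alt A B hpre
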